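-- pv_equiv track=rewrite | github.com/hakaraman/Daily_Python | 20201016.py | ordered_courses1
-- ===== SOURCE A (Python) =====
-- def ordered_courses1(courses):
--     c = courses.copy()
--     result = []
--     while [] in c.values():
--         noreq = [k for k,v in c.items() if v == []]
--         for i in noreq:
--             result.append(i)
--             del c[i]
--             for k,v in c.items():
--                 if i in v:
--                     v.remove(i)
--                     c[k] = v
--     return result if len(c) == 0 else None
-- ===== SOURCE B (Python) =====
-- def ordered_courses1(courses):
--     indeg = {k: len(v) for k, v in courses.items()}
--     dependents = {k: set() for k in courses}
--     for k, v in courses.items():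
--         for p in v:
--             if p in dependents:
--                 dependents[p].add(k)
--     emitted = set()
--     result = []
--     while True:
--         layer = [k for k, d in indeg.items() if d == 0 and k not in emitted]
--         if not layer:
--             break
--         result += layer
--         emitted.update(layer)
--         for p in layer:
--             for k in dependents[p]:
--                 indeg[k] -= 1
--     return result if len(result) == len(indeg) else None
-- ===== Notes on version B (the rewrite author's own statement) =====
-- stated objective: alternative
-- what changed: A repeatedly rescans the whole dict and destructively deletes each emitted course from every remaining prerequisite list; B is Kahn's algorithm: it precomputes indegree counts and a reverse-dependency index once, then emits layers in dict order, decrementing only the affected counters.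
import Mathlib
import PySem

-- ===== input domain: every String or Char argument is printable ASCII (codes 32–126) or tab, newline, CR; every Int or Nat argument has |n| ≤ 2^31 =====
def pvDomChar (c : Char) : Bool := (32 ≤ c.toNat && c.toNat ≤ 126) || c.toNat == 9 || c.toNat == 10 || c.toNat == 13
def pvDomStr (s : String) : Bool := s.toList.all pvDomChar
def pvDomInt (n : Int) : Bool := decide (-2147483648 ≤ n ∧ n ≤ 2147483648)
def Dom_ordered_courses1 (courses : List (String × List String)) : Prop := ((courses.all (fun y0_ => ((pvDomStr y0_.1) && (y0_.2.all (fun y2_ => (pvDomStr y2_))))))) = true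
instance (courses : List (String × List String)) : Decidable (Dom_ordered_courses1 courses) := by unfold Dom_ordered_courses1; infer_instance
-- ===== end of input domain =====

-- B replaces A's destructive per-course deletion from every remaining prerequisite list by
-- Kahn-style indegree counters with a reverse-dependency index, emitting layers in dict order
-- (return value only: A mutates the caller's prerequisite lists through its shallow copy, B never does).

-- ===== PORT A =====
-- inner loop 'for k,v in c.items(): if i in v: v.remove(i); c[k] = v'
def pvEraseVal (i : String) (c : List (String × List String)) : List (String × List String) :=
  c.map (fun kv => if i ∈ kv.2 then (kv.1, kv.2.erase i) else kv)

-- body of 'for i in noreq: result.append(i); del c[i]; <inner loop>'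
def pvEmitA (st : List (String × List String) × List String) (i : String) :
    List (String × List String) × List String :=
  (pvEraseVal i (st.1.filter (fun kv => kv.1 ≠ i)), st.2 ++ [i])

-- 'while [] in c.values(): …'; each iteration deletes at least one key, so fuel = len(c)+1 suffices
def pvLoopA : Nat → List (String × List String) → List String →
    List (String × List String) × List String
  | 0, c, result => (c, result)
  | fuel+1, c, result =>
    if [] ∈ c.map (·.2) then
      let noreq := (c.filter (fun kv => kv.2 = [])).map (·.1)
      let st := noreq.foldl pvEmitA (c, result)
      pvLoopA fuel st.1 st.2
    else (c, result)

def ordered_courses1 (courses : List (String × List String)) : Option (List String) :=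
  let c := (PySem.Dict.ofList courses).items   -- c = courses.copy()  (the dict behind the assoc list)
  let st := pvLoopA (c.length + 1) c []
  if st.1.length = 0 then some st.2 else none

-- ===== PORT B =====
-- indeg = {k: len(v) for k, v in courses.items()}
def pvInDeg (items : List (String × List String)) : PySem.Dict String Int :=
  items.foldl (fun d kv => d.insert kv.1 (kv.2.length : Int)) PySem.Dict.empty

-- 'for p in v: if p in dependents: dependents[p].add(k)' for one item (k, v)
def pvDepsStep (d : PySem.Dict String (PySem.Set String)) (kv : String × List String) :
    PySem.Dict String (PySem.Set String) :=
  kv.2.foldl (fun d p =>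
    if d.contains p then d.modify p PySem.Set.empty (fun s => PySem.Set.add s kv.1) else d) d

-- dependents = {k: set() for k in courses}; then the double loop filling it
def pvDeps (items : List (String × List String)) : PySem.Dict String (PySem.Set String) :=
  items.foldl pvDepsStep
    (items.foldl (fun d kv => d.insert kv.1 PySem.Set.empty) PySem.Dict.empty)

-- 'for k in dependents[p]: indeg[k] -= 1'
def pvDecr (deps : PySem.Dict String (PySem.Set String)) (ind : PySem.Dict String Int)
    (p : String) : PySem.Dict String Int :=
  (deps.getD p PySem.Set.empty).foldl (fun ind k => ind.modify k 0 (fun x => x - 1)) ind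

-- the while loop; at least one course is emitted per iteration, so fuel = len(indeg)+1 suffices
def pvLoopB : Nat → PySem.Dict String Int → PySem.Dict String (PySem.Set String) →
    PySem.Set String → List String → PySem.Dict String Int × List String
  | 0, ind, _, _, res => (ind, res)
  | fuel+1, ind, deps, emitted, res =>
    let layer := (ind.items.filter
        (fun kv => kv.2 == 0 && !(PySem.Set.contains emitted kv.1))).map (·.1)
    if layer.isEmpty then (ind, res)
    else pvLoopB fuel (layer.foldl (pvDecr deps) ind) deps
           (PySem.Set.update emitted layer) (res ++ layer)

def ordered_courses1_alt (courses : List (String × List String)) : Option (List String) :=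
  let items := (PySem.Dict.ofList courses).items
  let st := pvLoopB (items.length + 1) (pvInDeg items) (pvDeps items) PySem.Set.empty []
  if st.2.length = st.1.size then some st.2 else none

-- ===== PRECONDITION & SPEC =====
def Spec_ordered_courses1 (courses : List (String × List String)) (out : Option (List String)) : Prop := out = ordered_courses1_alt courses
instance (courses : List (String × List String)) (out : Option (List String)) : Decidable (Spec_ordered_courses1 courses out) := by unfold Spec_ordered_courses1; infer_instance

-- ===== CLAIM (what is proved, stated in full; the proofs are below) =====
def Claim_equal_ordered_courses1 : Prop := ∀ (courses : List (String × List String)), Dom_ordered_courses1 courses → Spec_ordered_courses1 courses (ordered_courses1 courses)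

-- ===== LEMMAS AND PROOFS =====

-- A's dict c after the courses of r have been emitted: those keys deleted, each erased once from every value
def pvC (r : List String) (items : List (String × List String)) : List (String × List String) :=
  (items.filter (fun kv => !(r.contains kv.1))).map
    (fun kv => (kv.1, r.foldl (fun v i => v.erase i) kv.2))

-- two items of a key-nodup list with the same key are the same item
theorem pvKeyInj {α β : Type} (l : List (α × β)) (h : (l.map Prod.fst).Nodup)
    {x y : α × β} (hx : x ∈ l) (hy : y ∈ l) (he : x.1 = y.1) : x = y := by
  induction l with
  | nil => cases hx
  | cons a t ih =>
    rw [List.map_cons, List.nodup_cons] at h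
    rcases List.mem_cons.mp hx with rfl | hx' <;> rcases List.mem_cons.mp hy with rfl | hy'
    · rfl
    · exact absurd (he ▸ List.mem_map.mpr ⟨y, hy', rfl⟩) h.1
    · exact absurd (he ▸ List.mem_map.mpr ⟨x, hx', rfl⟩) h.1
    · exact ih h.2 hx' hy'

theorem pvEraseVal_eq (i : String) (c : List (String × List String)) :
    pvEraseVal i c = c.map (fun kv => (kv.1, kv.2.erase i)) := by
  unfold pvEraseVal
  refine List.map_congr_left (fun kv _ => ?_)
  by_cases h : i ∈ kv.2
  · simp [h]
  · simp [h, List.erase_of_not_mem h]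

-- length of the prerequisite list after erasing each emitted course once
theorem pvFoldErase_len (r : List String) (hr : r.Nodup) (v : List String) :
    (((r.foldl (fun v i => v.erase i) v).length : Int)) =
      (v.length : Int) - ((r.filter (fun i => decide (i ∈ v))).length : Int) := by
  induction r generalizing v with
  | nil => simp
  | cons i r' ih =>
    have har' : i ∉ r' := (List.nodup_cons.mp hr).1
    have hr' : r'.Nodup := (List.nodup_cons.mp hr).2
    rw [List.foldl_cons, ih hr' (v.erase i)]
    have hf : r'.filter (fun j => decide (j ∈ v.erase i)) = r'.filter (fun j => decide (j ∈ v)) := by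
      refine List.filter_congr (fun j hj => ?_)
      have hne : j ≠ i := fun h => har' (h ▸ hj)
      simp [List.mem_erase_of_ne hne]
    rw [hf]
    rw [List.length_erase, List.filter_cons]
    by_cases hiv : i ∈ v
    · have h1 : 1 ≤ v.length := List.length_pos_of_mem hiv
      simp only [hiv, decide_true, if_true, List.length_cons]
      push_cast [Nat.cast_sub h1]
      ring
    · simp [hiv]

-- fold of 'indeg[k] -= 1' over a list of keys
theorem pvGetD_foldl_sub_one (l : List String) (d : PySem.Dict String Int) (k : String) :
    (l.foldl (fun d x => d.modify x 0 (fun y => y - 1)) d).getD k 0 =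
      d.getD k 0 - (List.count k l : Int) := by
  induction l generalizing d with
  | nil => simp
  | cons x l ih =>
    rw [List.foldl_cons, ih, PySem.Dict.getD_modify, List.count_cons]
    by_cases h : k = x
    · subst h
      simp only [beq_self_eq_true, if_pos trivial]
      push_cast
      ring
    · have hbk : (x == k) = false := by simp [Ne.symm h]
      simp [h, hbk]

-- Set.update adds nothing when everything is already present
theorem pvSet_update_subset {α : Type} [BEq α] [LawfulBEq α] (xs : List α) (s : PySem.Set α)
    (h : ∀ x ∈ xs, x ∈ s) : PySem.Set.update s xs = s := by
  induction xs generalizing s with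
  | nil => rfl
  | cons x xs ih =>
    have hc : PySem.Set.add s x = s := by
      have hm : x ∈ s := h x (List.mem_cons_self ..)
      simp [PySem.Set.add, hm]
    show PySem.Set.update (PySem.Set.add s x) xs = s
    rw [hc]
    exact ih s (fun y hy => h y (List.mem_cons_of_mem _ hy))

theorem pvSet_add_nodup {α : Type} [BEq α] [LawfulBEq α] (s : PySem.Set α) (x : α)
    (h : s.Nodup) : (PySem.Set.add s x).Nodup := by
  by_cases hm : x ∈ s
  · simp [PySem.Set.add, hm, h]
  · have he : PySem.Set.add s x = s ++ [x] := by simp [PySem.Set.add, hm]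
    rw [he, List.nodup_append]
    refine ⟨h, List.nodup_singleton x, ?_⟩
    intro a ha b hb
    rw [List.mem_singleton] at hb
    exact fun he => hm (hb ▸ he ▸ ha)

theorem pvSet_add_idem {α : Type} [BEq α] [LawfulBEq α] (s : PySem.Set α) (x : α) :
    PySem.Set.add (PySem.Set.add s x) x = PySem.Set.add s x := by
  by_cases hm : x ∈ s
  · have h1 : PySem.Set.add s x = s := by simp [PySem.Set.add, hm]
    rw [h1, h1]
  · have h1 : PySem.Set.add s x = s ++ [x] := by simp [PySem.Set.add, hm]
    have hm2 : x ∈ s ++ [x] := by simp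
    rw [h1]
    simp [PySem.Set.add, hm2]

-- one item's inner loop 'for p in v: if p in dependents: dependents[p].add(k0)'
theorem pvDepsInner (k0 : String) (v : List String) (d : PySem.Dict String (PySem.Set String)) :
    (v.foldl (fun d p => if d.contains p then d.modify p PySem.Set.empty (fun s => PySem.Set.add s k0) else d) d).keys = d.keys ∧
    ∀ p, (v.foldl (fun d p => if d.contains p then d.modify p PySem.Set.empty (fun s => PySem.Set.add s k0) else d) d).getD p PySem.Set.empty =
      if p ∈ d.keys ∧ p ∈ v then PySem.Set.add (d.getD p PySem.Set.empty) k0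
      else d.getD p PySem.Set.empty := by
  induction v generalizing d with
  | nil => exact ⟨rfl, fun p => by simp⟩
  | cons p0 v' ih =>
    rw [List.foldl_cons]
    by_cases hc : d.contains p0 = true
    · rw [if_pos hc]
      set d1 := d.modify p0 PySem.Set.empty (fun s => PySem.Set.add s k0) with hd1
      have hk1 : d1.keys = d.keys := by
        rw [hd1, PySem.Dict.keys_modify, PySem.Dict.keys_insert_of_contains _ _ hc]
      obtain ⟨ihk, ihg⟩ := ih d1
      refine ⟨ihk.trans hk1, fun p => ?_⟩
      rw [ihg p, hk1]
      have hg1 : ∀ q, d1.getD q PySem.Set.empty =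
          if q = p0 then PySem.Set.add (d.getD p0 PySem.Set.empty) k0
          else d.getD q PySem.Set.empty :=
        fun q => PySem.Dict.getD_modify d p0 q PySem.Set.empty _
      by_cases hp0 : p = p0
      · subst hp0
        have hpk : p ∈ d.keys := (PySem.Dict.contains_iff_mem_keys d p).mp hc
        by_cases hpv : p ∈ v'
        · rw [if_pos ⟨hpk, hpv⟩, hg1 p, if_pos rfl, pvSet_add_idem,
            if_pos ⟨hpk, List.mem_cons_self ..⟩]
        · rw [if_neg (fun hh => hpv hh.2), hg1 p, if_pos rfl,
            if_pos ⟨hpk, List.mem_cons_self ..⟩]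
      · rw [hg1 p, if_neg hp0]
        have hiff : (p ∈ d.keys ∧ p ∈ p0 :: v') ↔ (p ∈ d.keys ∧ p ∈ v') := by
          rw [List.mem_cons]; tauto
        by_cases hcond : p ∈ d.keys ∧ p ∈ v'
        · rw [if_pos hcond, if_pos (hiff.mpr hcond)]
        · rw [if_neg hcond, if_neg (fun hh => hcond (hiff.mp hh))]
    · rw [if_neg hc]
      obtain ⟨ihk, ihg⟩ := ih d
      have hpk0 : p0 ∉ d.keys := fun hm => hc ((PySem.Dict.contains_iff_mem_keys d p0).mpr hm)
      refine ⟨ihk, fun p => ?_⟩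
      rw [ihg p]
      have hiff : (p ∈ d.keys ∧ p ∈ p0 :: v') ↔ (p ∈ d.keys ∧ p ∈ v') := by
        rw [List.mem_cons]
        constructor
        · rintro ⟨h1, rfl | h2⟩
          · exact absurd h1 hpk0
          · exact ⟨h1, h2⟩
        · tauto
      by_cases hcond : p ∈ d.keys ∧ p ∈ v'
      · rw [if_pos hcond, if_pos (hiff.mpr hcond)]
      · rw [if_neg hcond, if_neg (fun hh => hcond (hiff.mp hh))]

theorem pvDepsOuter (l : List (String × List String)) (d : PySem.Dict String (PySem.Set String)) :
    (l.foldl pvDepsStep d).keys = d.keys ∧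
    ∀ p k, k ∈ (l.foldl pvDepsStep d).getD p PySem.Set.empty ↔
      (k ∈ d.getD p PySem.Set.empty ∨ (p ∈ d.keys ∧ ∃ kv ∈ l, kv.1 = k ∧ p ∈ kv.2)) := by
  induction l generalizing d with
  | nil => simp
  | cons kv l ih =>
    rw [List.foldl_cons]
    obtain ⟨hK, hG⟩ := pvDepsInner kv.1 kv.2 d
    have hKs : (pvDepsStep d kv).keys = d.keys := hK
    obtain ⟨ihk, ihg⟩ := ih (pvDepsStep d kv)
    refine ⟨ihk.trans hKs, fun p k => ?_⟩
    rw [ihg p k, hKs]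
    have hg : (pvDepsStep d kv).getD p PySem.Set.empty =
        if p ∈ d.keys ∧ p ∈ kv.2 then PySem.Set.add (d.getD p PySem.Set.empty) kv.1
        else d.getD p PySem.Set.empty := hG p
    rw [hg]
    by_cases hcond : p ∈ d.keys ∧ p ∈ kv.2
    · rw [if_pos hcond]
      rw [PySem.Set.mem_add]
      constructor
      · rintro ((h | h) | h)
        · exact Or.inl h
        · exact Or.inr ⟨hcond.1, kv, List.mem_cons_self .., h.symm, hcond.2⟩
        · exact Or.inr ⟨h.1, h.2.imp (fun kv' hh => ⟨List.mem_cons_of_mem _ hh.1, hh.2⟩)⟩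
      · rintro (h | ⟨hpk, kv', hkv', hk', hp'⟩)
        · exact Or.inl (Or.inl h)
        · rcases List.mem_cons.mp hkv' with rfl | hmem
          · exact Or.inl (Or.inr hk'.symm)
          · exact Or.inr ⟨hpk, kv', hmem, hk', hp'⟩
    · rw [if_neg hcond]
      constructor
      · rintro (h | ⟨hpk, kv', hkv', hk', hp'⟩)
        · exact Or.inl h
        · exact Or.inr ⟨hpk, kv', List.mem_cons_of_mem _ hkv', hk', hp'⟩
      · rintro (h | ⟨hpk, kv', hkv', hk', hp'⟩)
        · exact Or.inl h
        · rcases List.mem_cons.mp hkv' with rfl | hmem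
          · exact absurd ⟨hpk, hp'⟩ hcond
          · exact Or.inr ⟨hpk, kv', hmem, hk', hp'⟩

theorem pvDepsOuterNodup (l : List (String × List String)) (d : PySem.Dict String (PySem.Set String))
    (h : ∀ p, (d.getD p PySem.Set.empty).Nodup) :
    ∀ p, ((l.foldl pvDepsStep d).getD p PySem.Set.empty).Nodup := by
  induction l generalizing d with
  | nil => exact h
  | cons kv l ih =>
    rw [List.foldl_cons]
    refine ih (pvDepsStep d kv) (fun p => ?_)
    have hg : (pvDepsStep d kv).getD p PySem.Set.empty =
        if p ∈ d.keys ∧ p ∈ kv.2 then PySem.Set.add (d.getD p PySem.Set.empty) kv.1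
        else d.getD p PySem.Set.empty := (pvDepsInner kv.1 kv.2 d).2 p
    rw [hg]
    split
    · exact pvSet_add_nodup _ _ (h p)
    · exact h p

theorem pvDeps0_getD (items : List (String × List String)) (d : PySem.Dict String (PySem.Set String))
    (h : ∀ p, d.getD p PySem.Set.empty = PySem.Set.empty) :
    ∀ p, (items.foldl (fun d kv => d.insert kv.1 PySem.Set.empty) d).getD p PySem.Set.empty = PySem.Set.empty := by
  induction items generalizing d with
  | nil => exact h
  | cons kv l ih =>
    rw [List.foldl_cons]
    refine ih _ (fun p => ?_)
    rw [PySem.Dict.getD_insert]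
    split
    · rfl
    · exact h p

theorem pvDeps0_keys (items : List (String × List String)) (hk : (items.map Prod.fst).Nodup) :
    (items.foldl (fun d kv => d.insert kv.1 PySem.Set.empty)
      (PySem.Dict.empty : PySem.Dict String (PySem.Set String))).keys = items.map Prod.fst := by
  have h := PySem.Dict.items_foldl_insert_fresh items (fun kv => kv.1)
      (fun _ => (PySem.Set.empty : PySem.Set String)) PySem.Dict.empty
      (fun a _ => by simp) hk
  show ((items.foldl (fun d kv => d.insert kv.1 PySem.Set.empty)
      (PySem.Dict.empty : PySem.Dict String (PySem.Set String))).items).map (·.1) = items.map Prod.fst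
  rw [h]
  simp [PySem.Dict.empty]

-- the dependents dict: k ∈ dependents[p] iff p is a course and (k, v) is an item with p ∈ v
theorem pvDepsSpec (items0 : List (String × List String)) (hk : (items0.map Prod.fst).Nodup) :
    (∀ p k, k ∈ (pvDeps items0).getD p PySem.Set.empty ↔
      (p ∈ items0.map Prod.fst ∧ ∃ kv ∈ items0, kv.1 = k ∧ p ∈ kv.2)) ∧
    (∀ p, ((pvDeps items0).getD p PySem.Set.empty).Nodup) := by
  unfold pvDeps
  set d0 := items0.foldl (fun d kv => d.insert kv.1 PySem.Set.empty) PySem.Dict.empty with hd0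
  have h0g : ∀ p, d0.getD p PySem.Set.empty = PySem.Set.empty :=
    pvDeps0_getD items0 PySem.Dict.empty (fun p => by simp)
  have h0k : d0.keys = items0.map Prod.fst := pvDeps0_keys items0 hk
  obtain ⟨hK, hG⟩ := pvDepsOuter items0 d0
  refine ⟨fun p k => ?_, pvDepsOuterNodup items0 d0 (fun p => by rw [h0g p]; exact List.nodup_nil)⟩
  rw [hG p k, h0g p, h0k]
  simp [PySem.Set.empty]

theorem pvInDegSpec (items0 : List (String × List String)) (hk : (items0.map Prod.fst).Nodup) :
    (pvInDeg items0).keys = items0.map Prod.fst ∧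
    ∀ kv ∈ items0, (pvInDeg items0).getD kv.1 0 = (kv.2.length : Int) := by
  have h := PySem.Dict.items_foldl_insert_fresh items0 (fun kv => kv.1)
      (fun kv => (kv.2.length : Int)) PySem.Dict.empty (fun a _ => by simp) hk
  have hitems : (pvInDeg items0).items = items0.map (fun kv => (kv.1, (kv.2.length : Int))) := by
    unfold pvInDeg
    rw [h]
    simp [PySem.Dict.empty]
  have hkeys : (pvInDeg items0).keys = items0.map Prod.fst := by
    show ((pvInDeg items0).items).map (·.1) = items0.map Prod.fst
    rw [hitems]
    simp
  refine ⟨hkeys, fun kv hkv => ?_⟩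
  refine PySem.Dict.getD_of_mem_items _ ?_ (hkeys ▸ hk) 0
  rw [hitems]
  exact List.mem_map.mpr ⟨kv, hkv, rfl⟩

-- fold of pvDecr over a layer, pointwise on getD
theorem pvDecrFoldGetD (deps : PySem.Dict String (PySem.Set String))
    (hnd : ∀ p, (deps.getD p PySem.Set.empty).Nodup)
    (l : List String) (ind : PySem.Dict String Int) (k : String) :
    (l.foldl (pvDecr deps) ind).getD k 0 =
      ind.getD k 0 - ((l.filter (fun p => decide (k ∈ deps.getD p PySem.Set.empty))).length : Int) := by
  induction l generalizing ind with
  | nil => simp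
  | cons p l ih =>
    rw [List.foldl_cons, ih, List.filter_cons]
    have hstep : (pvDecr deps ind p).getD k 0 =
        ind.getD k 0 - (List.count k (deps.getD p PySem.Set.empty) : Int) :=
      pvGetD_foldl_sub_one (deps.getD p PySem.Set.empty) ind k
    rw [hstep]
    by_cases hm : k ∈ deps.getD p PySem.Set.empty
    · rw [List.count_eq_one_of_mem (hnd p) hm]
      simp only [hm, decide_true, if_true, List.length_cons]
      push_cast
      ring
    · rw [List.count_eq_zero_of_not_mem hm]
      simp only [hm, decide_false, Bool.false_eq_true, if_false]
      push_cast
      ring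

theorem pvDecrFoldKeys (deps : PySem.Dict String (PySem.Set String)) (l : List String)
    (ind : PySem.Dict String Int)
    (h : ∀ p ∈ l, ∀ k ∈ deps.getD p PySem.Set.empty, k ∈ ind.keys) :
    (l.foldl (pvDecr deps) ind).keys = ind.keys := by
  induction l generalizing ind with
  | nil => rfl
  | cons p l ih =>
    rw [List.foldl_cons]
    have hstep : (pvDecr deps ind p).keys = ind.keys := by
      unfold pvDecr
      rw [PySem.Dict.keys_foldl_modify (deps.getD p PySem.Set.empty) 0 (fun _ _ => (fun y => y - 1)) ind]
      exact pvSet_update_subset _ _ (h p (List.mem_cons_self ..))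
    rw [ih (pvDecr deps ind p) (fun q hq k hkm => hstep ▸ h q (List.mem_cons_of_mem _ hq) k hkm), hstep]

theorem pvRoundFold (noreq : List String) (c : List (String × List String)) (result : List String) :
    noreq.foldl pvEmitA (c, result) =
      (noreq.foldl (fun c i => pvEraseVal i (c.filter (fun kv => kv.1 ≠ i))) c, result ++ noreq) := by
  induction noreq generalizing c result with
  | nil => simp
  | cons i rest ih => simp [pvEmitA, ih]

theorem pvRoundBatch (noreq : List String) (c : List (String × List String)) :
    noreq.foldl (fun c i => pvEraseVal i (c.filter (fun kv => kv.1 ≠ i))) c =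
      (c.filter (fun kv => !noreq.contains kv.1)).map
        (fun kv => (kv.1, noreq.foldl (fun v i => v.erase i) kv.2)) := by
  induction noreq generalizing c with
  | nil => simp
  | cons i rest ih =>
    rw [List.foldl_cons, ih, pvEraseVal_eq, List.filter_map, List.map_map, List.filter_filter]
    simp only [Function.comp_def]
    rw [List.filter_congr (q := fun kv => !(i :: rest).contains kv.1)
          (fun kv _ => by simp [Bool.and_comm])]
    rfl

-- one whole round of A, seen on the c-state
theorem pvC_round (items0 : List (String × List String)) (r L : List String) :
    L.foldl (fun c i => pvEraseVal i (c.filter (fun kv => kv.1 ≠ i))) (pvC r items0) =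
      pvC (r ++ L) items0 := by
  rw [pvRoundBatch]
  unfold pvC
  rw [List.filter_map, List.map_map, List.filter_filter]
  simp only [Function.comp_def]
  rw [List.filter_congr (q := fun kv => !((r ++ L).contains kv.1))
        (fun kv _ => by simp [List.contains_eq_mem, List.mem_append, Bool.and_comm])]
  refine List.map_congr_left (fun kv _ => ?_)
  rw [List.foldl_append]

-- emptiness of A's remaining dict vs. the number of emitted courses
theorem pvCount (items0 : List (String × List String)) (hk : (items0.map (·.1)).Nodup)
    (r : List String) (hrnd : r.Nodup) (hrk : ∀ x ∈ r, x ∈ items0.map (·.1)) :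
    ((pvC r items0).length = 0) ↔ (r.length = items0.length) := by
  unfold pvC
  rw [List.length_map, List.length_eq_zero_iff, List.filter_eq_nil_iff]
  constructor
  · intro h
    have hsub : ∀ x ∈ items0.map (·.1), x ∈ r := by
      intro x hx
      rcases List.mem_map.mp hx with ⟨kv, hkv, rfl⟩
      have := h kv hkv
      simpa [List.contains_eq_mem] using this
    have h1 := (List.subperm_of_subset hrnd (fun x hx => hrk x hx)).length_le
    have h2 := (List.subperm_of_subset hk hsub).length_le
    rw [List.length_map] at h1 h2
    omega
  · intro hlen kv hkv
    have hsp := List.subperm_of_subset hrnd (fun x hx => hrk x hx)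
    have hperm := hsp.perm_of_length_le (by rw [List.length_map]; omega)
    have hmem : kv.1 ∈ r := (hperm.mem_iff).mpr (List.mem_map.mpr ⟨kv, hkv, rfl⟩)
    simp [List.contains_eq_mem, hmem]

theorem pvLoopA_succ (fuel : Nat) (c : List (String × List String)) (result : List String) :
    pvLoopA (fuel+1) c result =
      if [] ∈ c.map (·.2) then
        pvLoopA fuel
          (((c.filter (fun kv => kv.2 = [])).map (·.1)).foldl pvEmitA (c, result)).1
          (((c.filter (fun kv => kv.2 = [])).map (·.1)).foldl pvEmitA (c, result)).2
      else (c, result) := rfl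

theorem pvLoopB_succ (fuel : Nat) (ind : PySem.Dict String Int)
    (deps : PySem.Dict String (PySem.Set String)) (emitted : PySem.Set String) (res : List String) :
    pvLoopB (fuel+1) ind deps emitted res =
      if ((ind.items.filter (fun kv => kv.2 == 0 && !(PySem.Set.contains emitted kv.1))).map (·.1)).isEmpty then
        (ind, res)
      else pvLoopB fuel
        (((ind.items.filter (fun kv => kv.2 == 0 && !(PySem.Set.contains emitted kv.1))).map (·.1)).foldl (pvDecr deps) ind)
        deps
        (PySem.Set.update emitted ((ind.items.filter (fun kv => kv.2 == 0 && !(PySem.Set.contains emitted kv.1))).map (·.1)))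
        (res ++ ((ind.items.filter (fun kv => kv.2 == 0 && !(PySem.Set.contains emitted kv.1))).map (·.1))) := rfl

-- the main loop invariant: A's (c, result) tracks B's (indeg, emitted, result)
theorem pvMain (items0 : List (String × List String))
    (hk : (items0.map (·.1)).Nodup)
    (deps : PySem.Dict String (PySem.Set String)) (hdeps : deps = pvDeps items0)
    (fuel : Nat) (r : List String) (emitted : PySem.Set String) (ind : PySem.Dict String Int)
    (hrnd : r.Nodup) (hrk : ∀ x ∈ r, x ∈ items0.map (·.1))
    (hem : ∀ x, x ∈ emitted ↔ x ∈ r)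
    (hik : ind.keys = items0.map (·.1))
    (hiv : ∀ kv ∈ items0, ind.getD kv.1 0 =
      (kv.2.length : Int) - ((r.filter (fun i => decide (i ∈ kv.2))).length : Int)) :
    pvLoopA fuel (pvC r items0) r =
      (pvC (pvLoopB fuel ind deps emitted r).2 items0, (pvLoopB fuel ind deps emitted r).2) ∧
    (pvLoopB fuel ind deps emitted r).1.keys = items0.map (·.1) ∧
    (pvLoopB fuel ind deps emitted r).2.Nodup ∧
    (∀ x ∈ (pvLoopB fuel ind deps emitted r).2, x ∈ items0.map (·.1)) := by
  obtain ⟨hds, hdn⟩ := pvDepsSpec items0 hk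
  induction fuel generalizing r emitted ind with
  | zero => exact ⟨rfl, hik, hrnd, hrk⟩
  | succ fuel ih =>
    rw [pvLoopA_succ, pvLoopB_succ]
    have hknodup : ind.keys.Nodup := hik ▸ hk
    have hitems : ind.items = items0.map (fun kv => (kv.1, ind.getD kv.1 0)) := by
      rw [PySem.Dict.items_eq_map_keys ind hknodup 0, hik, List.map_map]
      rfl
    set L := (items0.filter
        (fun kv => decide ((r.foldl (fun v i => v.erase i) kv.2) = []) && !(r.contains kv.1))).map
        (fun kv => kv.1) with hL
    -- B's layer is L
    have hlayerB : ((ind.items.filter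
        (fun kv => kv.2 == 0 && !(PySem.Set.contains emitted kv.1))).map (·.1)) = L := by
      rw [hitems, List.filter_map, List.map_map]
      simp only [Function.comp_def, hL]
      refine congrArg _ (List.filter_congr (fun kv hkv => ?_))
      have h1 : ind.getD kv.1 0 = ((r.foldl (fun v i => v.erase i) kv.2).length : Int) := by
        rw [hiv kv hkv, pvFoldErase_len r hrnd kv.2]
      have h2 : (ind.getD kv.1 0 == 0) =
          decide ((r.foldl (fun v i => v.erase i) kv.2) = []) := by
        rw [h1, Bool.eq_iff_iff, beq_iff_eq, decide_eq_true_iff]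
        constructor
        · intro hh
          have hlen : (r.foldl (fun v i => v.erase i) kv.2).length = 0 := by exact_mod_cast hh
          exact List.length_eq_zero_iff.mp hlen
        · intro hh
          rw [hh]
          rfl
      have h3 : PySem.Set.contains emitted kv.1 = r.contains kv.1 := by
        rw [Bool.eq_iff_iff, PySem.Set.contains_iff, hem, List.contains_eq_mem, decide_eq_true_iff]
      rw [h2, h3]
    -- A's noreq is L
    have hnoreqA : (((pvC r items0).filter (fun kv => kv.2 = [])).map (·.1)) = L := by
      unfold pvC
      rw [List.filter_map, List.map_map, List.filter_filter]
      simp only [Function.comp_def, hL]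
    -- A's while guard
    have hguard : ([] ∈ (pvC r items0).map (·.2)) ↔ ¬ L.isEmpty = true := by
      rw [← hnoreqA]
      simp only [List.isEmpty_iff, List.map_eq_nil_iff, List.filter_eq_nil_iff, List.mem_map,
        decide_eq_true_iff]
      constructor
      · rintro ⟨kv, hkv, hnil⟩ hall
        exact hall kv hkv hnil
      · intro h
        push Not at h
        rcases h with ⟨kv, hkv, hnil⟩
        exact ⟨kv, hkv, hnil⟩
    rw [hlayerB]
    by_cases hne : L.isEmpty = true
    · rw [if_neg (by rw [hguard]; exact fun h => h hne), if_pos hne]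
      exact ⟨rfl, hik, hrnd, hrk⟩
    · rw [if_pos (hguard.mpr hne), if_neg hne]
      -- facts about L
      have hLk : ∀ x ∈ L, x ∈ items0.map (·.1) := by
        intro x hx
        rcases List.mem_map.mp hx with ⟨kv, hkv, rfl⟩
        exact List.mem_map.mpr ⟨kv, List.mem_of_mem_filter hkv, rfl⟩
      have hLnd : L.Nodup := by
        rw [hL]
        exact (List.filter_sublist.map (fun kv : String × List String => kv.1)).nodup hk
      have hLr : ∀ x ∈ L, x ∉ r := by
        intro x hx
        rcases List.mem_map.mp hx with ⟨kv, hkv, rfl⟩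
        have := List.of_mem_filter hkv
        rw [Bool.and_eq_true] at this
        have h2 := this.2
        rw [Bool.not_eq_eq_eq_not, Bool.not_true, List.contains_eq_mem,
          decide_eq_false_iff_not] at h2
        exact h2
      -- A's round
      rw [hnoreqA, pvRoundFold]
      simp only []
      rw [pvC_round]
      -- new invariants for the recursive call
      have hrnd' : (r ++ L).Nodup := by
        rw [List.nodup_append]
        exact ⟨hrnd, hLnd, fun a ha b hb he => hLr b hb (he ▸ ha)⟩
      have hrk' : ∀ x ∈ r ++ L, x ∈ items0.map (·.1) := by
        intro x hx
        rcases List.mem_append.mp hx with h | h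
        · exact hrk x h
        · exact hLk x h
      have hem' : ∀ x, x ∈ PySem.Set.update emitted L ↔ x ∈ r ++ L := by
        intro x
        rw [PySem.Set.mem_update, hem x, List.mem_append]
      have hik' : (L.foldl (pvDecr deps) ind).keys = items0.map (·.1) := by
        rw [pvDecrFoldKeys deps L ind, hik]
        intro p _ k hkm
        rw [hdeps] at hkm
        rcases ((hds p k).mp hkm).2 with ⟨kv, hkv, rfl, _⟩
        rw [hik]
        exact List.mem_map.mpr ⟨kv, hkv, rfl⟩
      have hiv' : ∀ kv ∈ items0, (L.foldl (pvDecr deps) ind).getD kv.1 0 =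
          (kv.2.length : Int) - (((r ++ L).filter (fun i => decide (i ∈ kv.2))).length : Int) := by
        intro kv hkv
        rw [pvDecrFoldGetD deps (by rw [hdeps]; exact hdn) L ind kv.1, hiv kv hkv]
        have hfc : L.filter (fun p => decide (kv.1 ∈ deps.getD p PySem.Set.empty)) =
            L.filter (fun p => decide (p ∈ kv.2)) := by
          refine List.filter_congr (fun p hp => ?_)
          rw [decide_eq_decide, hdeps, hds p kv.1]
          constructor
          · rintro ⟨_, kv', hkv', he, hp'⟩
            have := pvKeyInj items0 hk hkv' hkv he
            exact this ▸ hp'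
          · intro hpv
            exact ⟨hLk p hp, kv, hkv, rfl, hpv⟩
        rw [hfc, List.filter_append, List.length_append]
        push_cast
        ring
      exact ih (r ++ L) (PySem.Set.update emitted L) (L.foldl (pvDecr deps) ind)
        hrnd' hrk' hem' hik' hiv'

-- ===== VERDICT (by name: the statement is the Claim_ definition above) =====
theorem ordered_courses1_spec : Claim_equal_ordered_courses1 := by
  intro courses _
  unfold Spec_ordered_courses1 ordered_courses1 ordered_courses1_alt
  set items0 := (PySem.Dict.ofList courses).items with hi
  have hk : (items0.map (·.1)).Nodup := PySem.Dict.nodup_keys_ofList courses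
  obtain ⟨hik0, hiv0⟩ := pvInDegSpec items0 hk
  have h := pvMain items0 hk (pvDeps items0) rfl (items0.length + 1) [] PySem.Set.empty
    (pvInDeg items0) List.nodup_nil (by simp) (by simp [PySem.Set.empty]) hik0
    (fun kv hkv => by rw [hiv0 kv hkv]; simp)
  have hC0 : pvC [] items0 = items0 := by
    simp [pvC]
  rw [hC0] at h
  obtain ⟨heq, hkeys, hnd, hsub⟩ := h
  show (if (pvLoopA (items0.length + 1) items0 []).1.length = 0
      then some ((pvLoopA (items0.length + 1) items0 []).2) else none) =
    (if (pvLoopB (items0.length + 1) (pvInDeg items0) (pvDeps items0) PySem.Set.empty []).2.length =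
        (pvLoopB (items0.length + 1) (pvInDeg items0) (pvDeps items0) PySem.Set.empty []).1.size
      then some ((pvLoopB (items0.length + 1) (pvInDeg items0) (pvDeps items0) PySem.Set.empty []).2) else none)
  rw [heq]
  set st := pvLoopB (items0.length + 1) (pvInDeg items0) (pvDeps items0) PySem.Set.empty [] with hst
  have hsize : st.1.size = items0.length := by
    have h2 : (st.1.items.map (·.1)).length = (items0.map (fun x => x.1)).length :=
      congrArg List.length hkeys
    rw [List.length_map, List.length_map] at h2
    exact h2
  have hcnt := pvCount items0 hk st.2 hnd hsub
  by_cases h0 : (pvC st.2 items0).length = 0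
  · rw [if_pos h0, if_pos (by rw [hsize]; exact hcnt.mp h0)]
  · rw [if_neg h0, if_neg (fun hl => h0 (hcnt.mpr (by rw [hsize] at hl; exact hl)))]
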